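-- pv_equiv track=rewrite | github.com/clivepato93/Edabit_challenges | Easy/flick_switch.py | flick_switch
-- ===== SOURCE A (Python) =====
-- def flick_switch(lst):
--     final = []
--     truthy = True
--     for item in lst:
--         if item == "flick":
--             truthy = not(truthy)
--             final.append(truthy)
--         else:
--             final.append(truthy)
--     return final
-- ===== SOURCE B (Python) =====
-- def flick_switch(lst):
--     counts = []
--     c = 0
--     for x in lst:
--         c += x == "flick"
--         counts.append(c)
--     return [c % 2 == 0 for c in counts]
-- ===== Notes on version B (the rewrite author's own statement) =====
-- stated objective: alternative
-- what changed: B replaces the inline boolean toggle with a prefix-count pass (running count of 'flick' tokens) followed by a parity map; the state maintained is an integer count, not a toggled boolean.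
import Mathlib
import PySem

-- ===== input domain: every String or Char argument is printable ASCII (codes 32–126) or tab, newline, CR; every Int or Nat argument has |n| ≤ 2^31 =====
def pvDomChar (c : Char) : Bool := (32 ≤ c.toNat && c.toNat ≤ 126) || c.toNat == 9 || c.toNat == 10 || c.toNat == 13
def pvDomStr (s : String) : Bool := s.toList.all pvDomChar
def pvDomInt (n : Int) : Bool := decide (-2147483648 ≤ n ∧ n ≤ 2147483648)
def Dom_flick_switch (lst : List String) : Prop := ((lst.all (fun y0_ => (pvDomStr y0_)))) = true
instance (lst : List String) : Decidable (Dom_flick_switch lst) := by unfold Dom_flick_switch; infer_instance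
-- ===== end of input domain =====

-- B replaces A's inline boolean toggle with a prefix-count pass plus a parity map (alternative decomposition, same cost).


-- ===== PORT A =====
-- loop state: (final, truthy); appending to the back as Python does
def flick_switch (lst : List String) : List Bool :=
  (lst.foldl
    (fun (st : List Bool × Bool) item =>
      if item == "flick" then (st.1 ++ [!st.2], !st.2)
      else (st.1 ++ [st.2], st.2))
    ([], true)).1

-- ===== PORT B =====
-- first pass: running count of "flick" tokens
def fsCounts : List String → Nat → List Nat
  | [], _ => []
  | x :: xs, c =>
      let c' := c + (if x == "flick" then 1 else 0)
      c' :: fsCounts xs c'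

-- second pass: parity map
def flick_switch_alt (lst : List String) : List Bool :=
  (fsCounts lst 0).map (fun c => c % 2 == 0)

-- ===== PRECONDITION & SPEC =====
def Spec_flick_switch (lst : List String) (out : List Bool) : Prop := out = flick_switch_alt lst
instance (lst : List String) (out : List Bool) : Decidable (Spec_flick_switch lst out) := by unfold Spec_flick_switch; infer_instance

-- ===== CLAIM (what is proved, stated in full; the proofs are below) =====
def Claim_equal_flick_switch : Prop := ∀ (lst : List String), Dom_flick_switch lst → Spec_flick_switch lst (flick_switch lst)

-- ===== LEMMAS AND PROOFS =====
theorem fs_fold_eq (lst : List String) : ∀ (acc : List Bool) (b : Bool) (c : Nat),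
    b = (c % 2 == 0) →
    (lst.foldl
      (fun (st : List Bool × Bool) item =>
        if item == "flick" then (st.1 ++ [!st.2], !st.2)
        else (st.1 ++ [st.2], st.2))
      (acc, b)).1 = acc ++ (fsCounts lst c).map (fun c => c % 2 == 0) := by
  induction lst with
  | nil => intro acc b c hb; simp [fsCounts]
  | cons x xs ih =>
    intro acc b c hb
    by_cases hx : x == "flick"
    · have hb' : (!b) = ((c + 1) % 2 == 0) := by
        subst hb
        rcases Nat.mod_two_eq_zero_or_one c with h | h <;>
          simp [Nat.add_mod, h]
      simp only [List.foldl, fsCounts, hx, reduceIte]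
      rw [ih (acc ++ [!b]) (!b) (c + 1) hb']
      simp [hb']
    · simp only [List.foldl, fsCounts, hx, Bool.false_eq_true, reduceIte, Nat.add_zero]
      rw [ih (acc ++ [b]) b c hb]
      simp [hb]

-- ===== VERDICT (by name: the statement is the Claim_ definition above) =====
theorem flick_switch_spec : Claim_equal_flick_switch := by
  intro lst _
  show flick_switch lst = flick_switch_alt lst
  unfold flick_switch flick_switch_alt
  simpa using fs_fold_eq lst [] true 0 (by decide)
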